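-- pv_equiv track=rewrite | github.com/selvaramkumar/leetcode1451 | solution.py | arrangeWords
-- ===== SOURCE A (Python) =====
-- from collections import OrderedDict
--
-- def arrangeWords(text: str) -> str:
--     temp=text.split(" ")
--     dict1={}
--     for i in temp:
--         if  not len(i) in dict1:
--             dict1[len(i)]=i
--         else :
--             dict1[len(i)]=dict1[len(i)]+" "+i
--     res=""
--     dict2=OrderedDict(sorted(dict1.items()))
--     count=0
--     for key,value in dict2.items():
--         if count>=1:
--             res=res+" "+value[0].lower() + value[1:]
--             count=count+1
--         else:
--             res=res+value[0].upper() + value[1:]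
--             count=count+1
--     return res
-- ===== SOURCE B (Python) =====
-- def arrangeWords(text: str) -> str:
--     # Sort words by length (stable), merge consecutive same-length words into
--     # space-joined chunks, then sentence-case the chunk starts: the first chunk
--     # begins with a capital, every later chunk begins lowercase.
--     words = sorted(text.split(" "), key=len)
--     chunks = []
--     prev = None
--     for w in words:
--         if len(w) == prev:
--             chunks[-1] += " " + w
--         else:
--             chunks.append(w)
--         prev = len(w)
--     parts = [chunks[0][0].upper() + chunks[0][1:]]
--     parts += [c[0].lower() + c[1:] for c in chunks[1:]]
--     return " ".join(parts)
-- ===== Notes on version B (the rewrite author's own statement) =====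
-- stated objective: simpler
-- what changed: Replaces the length-keyed dict of concatenated strings plus OrderedDict(sorted(items)) and a counted loop with one stable sort by length, a linear merge of equal-length runs into chunks, and a comprehension that sentence-cases the chunk starts; Pre_ excludes texts whose split contains exactly one empty word, where both programs raise IndexError.
import Mathlib
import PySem

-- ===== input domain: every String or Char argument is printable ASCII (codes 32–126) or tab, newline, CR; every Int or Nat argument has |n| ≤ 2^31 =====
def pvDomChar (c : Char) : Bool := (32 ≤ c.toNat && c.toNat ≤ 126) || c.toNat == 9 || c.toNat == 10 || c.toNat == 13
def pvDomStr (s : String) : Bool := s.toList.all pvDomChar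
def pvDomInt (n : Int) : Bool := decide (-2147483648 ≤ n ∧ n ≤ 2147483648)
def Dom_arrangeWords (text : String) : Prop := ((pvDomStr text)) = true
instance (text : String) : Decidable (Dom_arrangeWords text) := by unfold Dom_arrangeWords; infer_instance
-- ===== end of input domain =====

-- B replaces A's length-keyed dict of concatenated strings + OrderedDict(sorted(items)) + counted
-- loop with one stable sort by length, a linear merge of equal-length runs into chunks, and a
-- comprehension that sentence-cases the chunk starts (objective: simpler).

-- ===== PORT A =====
-- loop 1: dict1[len(i)] = i  /  dict1[len(i)] = dict1[len(i)] + " " + i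
def arrangeA_step1 (d : PySem.Dict Int (List Char)) (i : List Char) : PySem.Dict Int (List Char) :=
  if ¬ d.contains (i.length : Int) then d.insert (i.length : Int) i
  else d.insert (i.length : Int) (d.getD (i.length : Int) [] ++ ' ' :: i)

-- loop 2 body over (key, value) with state (res, count); value[0] raises IndexError when value
-- is empty (pyGet? = none) — those inputs are excluded by Pre_ below.
def arrangeA_step2 (st : List Char × Int) (kv : Int × List Char) : List Char × Int :=
  match PySem.List.pyGet? kv.2 0 with
  | none => st
  | some c =>
    if st.2 ≥ 1 then
      (st.1 ++ ' ' :: PySem.Chars.lowerChar c :: PySem.List.slice kv.2 (some 1) none, st.2 + 1)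
    else
      (st.1 ++ PySem.Chars.upperChar c :: PySem.List.slice kv.2 (some 1) none, st.2 + 1)

def arrangeWords (text : String) : String :=
  let temp := PySem.Chars.splitOn text.toList [' ']
  let dict1 := temp.foldl arrangeA_step1 PySem.Dict.empty
  -- sorted(dict1.items()): pairs with DISTINCT first components, so Python's tuple order
  -- coincides with ordering by the integer key
  let dict2 := PySem.List.sorted dict1.items (fun p => p.1)
  String.ofList (dict2.foldl arrangeA_step2 ([], 0)).1

-- ===== PORT B =====
-- loop body: merge w into the last chunk when its length equals prev, else start a new chunk;
-- chunks[-1] can only be reached with chunks nonempty (prev is set only after a chunk exists),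
-- so the none branch of getLast? is unreachable.
def chunkStep (st : List (List Char) × Option Int) (w : List Char) :
    List (List Char) × Option Int :=
  let chunks :=
    if some ((w.length : Int)) = st.2 then
      match st.1.getLast? with
      | none => st.1
      | some c => st.1.dropLast ++ [c ++ ' ' :: w]
    else st.1 ++ [w]
  (chunks, some ((w.length : Int)))

-- c[0].upper() + c[1:] ; c[0] raises IndexError on an empty chunk (pyGet? = none) — excluded
-- by Pre_ below.
def recaseUpper (c : List Char) : List Char :=
  match PySem.List.pyGet? c 0 with
  | none => c
  | some a => PySem.Chars.upperChar a :: PySem.List.slice c (some 1) none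

def recaseLower (c : List Char) : List Char :=
  match PySem.List.pyGet? c 0 with
  | none => c
  | some a => PySem.Chars.lowerChar a :: PySem.List.slice c (some 1) none

def arrangeWords_alt (text : String) : String :=
  let words := PySem.List.sorted (PySem.Chars.splitOn text.toList [' ']) (fun w => (w.length : Int))
  let chunks := (words.foldl chunkStep ([], none)).1
  -- chunks[0]: split(" ") is never empty, so chunks is never empty
  let parts :=
    match chunks with
    | [] => []
    | c :: rest => recaseUpper c :: rest.map recaseLower
  String.ofList (PySem.Chars.join [' '] parts)

-- ===== PRECONDITION & SPEC =====
-- Pre_ excludes texts whose split contains EXACTLY ONE empty word (empty text, or one isolated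
-- extra space): there both A (value[0]) and B (c[0]) raise IndexError on the empty chunk.
def Pre_arrangeWords (text : String) : Prop :=
  (PySem.Chars.splitOn text.toList [' ']).count [] ≠ 1
instance (text : String) : Decidable (Pre_arrangeWords text) := by
  unfold Pre_arrangeWords; infer_instance

def pvWitness_arrangeWords : String := "Leetcode is cool"

def Spec_arrangeWords (text : String) (out : String) : Prop := out = arrangeWords_alt text
instance (text : String) (out : String) : Decidable (Spec_arrangeWords text out) := by
  unfold Spec_arrangeWords; infer_instance

-- ===== CLAIM (what is proved, stated in full; the proofs are below) =====
def Claim_equal_arrangeWords : Prop :=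
  ∀ (text : String), Dom_arrangeWords text → Pre_arrangeWords text →
    Spec_arrangeWords text (arrangeWords text)

-- ===== LEMMAS AND PROOFS =====

-- STABILITY of PySem.List.sorted: filtering one key class out of the sorted list returns that
-- key class in input order.
theorem insertBy_filter_eq {α : Type} (key : α → Int) (k : Int) (x : α) (acc : List α)
    (hs : acc.Pairwise (fun a b => key a ≤ key b)) :
    (PySem.List.insertBy (fun a b => decide (key a < key b)) x acc).filter
        (fun w => decide (key w = k)) =
      if key x = k then acc.filter (fun w => decide (key w = k)) ++ [x]
      else acc.filter (fun w => decide (key w = k)) := by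
  induction acc with
  | nil =>
    simp [PySem.List.insertBy, List.filter]
    split_ifs with h <;> simp [h]
  | cons y ys ih =>
    rw [List.pairwise_cons] at hs
    by_cases h : key x < key y
    · have hempty : (y :: ys).filter (fun w => decide (key w = k)) = [] ∨ ¬ key x = k := by
        by_cases hxk : key x = k
        · left
          apply List.filter_eq_nil_iff.mpr
          intro w hw
          simp only [decide_eq_true_eq]
          rcases List.mem_cons.mp hw with hw | hw
          · subst hw; omega
          · have := hs.1 w hw; omega
        · right; exact hxk
      simp only [PySem.List.insertBy, h, decide_true, if_pos]
      rcases hempty with he | he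
      · rw [List.filter_cons, he]
        split_ifs with h1 <;> simp_all
      · simp [he, List.filter_cons]
    · have hb : (decide (key x < key y)) = false := by simpa using h
      simp only [PySem.List.insertBy, hb, Bool.false_eq_true, if_false]
      rw [List.filter_cons, List.filter_cons, ih hs.2]
      split_ifs <;> simp

theorem sorted_filter_key {α : Type} (key : α → Int) (k : Int) (ws : List α) :
    (PySem.List.sorted ws key).filter (fun w => decide (key w = k)) =
      ws.filter (fun w => decide (key w = k)) := by
  induction ws using List.reverseRecOn with
  | nil => simp [PySem.List.sorted]
  | append_singleton l x ih =>
    have h1 : PySem.List.sorted (l ++ [x]) key =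
        PySem.List.insertBy (fun a b => decide (key a < key b)) x (PySem.List.sorted l key) := by
      rw [PySem.List.sorted_eq_foldl_insertBy, PySem.List.sorted_eq_foldl_insertBy,
        List.foldl_append]
      simp
    rw [h1, insertBy_filter_eq key k x _ (PySem.List.sorted_pairwise l key),
      List.filter_append, ih]
    split_ifs with h <;> simp [h]

-- a key-sorted list is the concatenation of its key classes, taken along any strictly
-- increasing enumeration of its keys
theorem sorted_min_prefix {α : Type} (key : α → Int) (k : Int) (L : List α)
    (hs : L.Pairwise (fun a b => key a ≤ key b)) (hmin : ∀ w ∈ L, k ≤ key w) :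
    L = L.filter (fun w => decide (key w = k)) ++ L.filter (fun w => !decide (key w = k)) := by
  induction L with
  | nil => simp
  | cons y ys ih =>
    rw [List.pairwise_cons] at hs
    by_cases h : key y = k
    · rw [List.filter_cons, List.filter_cons]
      simp only [h, decide_true, Bool.not_true, Bool.false_eq_true, if_true, if_false]
      rw [List.cons_append]
      congr 1
      exact ih hs.2 (fun w hw => hmin w (List.mem_cons_of_mem _ hw))
    · have hk : k < key y := lt_of_le_of_ne (hmin y (List.mem_cons_self)) (fun e => h e.symm)
      have hnone : ys.filter (fun w => decide (key w = k)) = [] := by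
        apply List.filter_eq_nil_iff.mpr
        intro w hw
        have := hs.1 w hw
        simp only [decide_eq_true_eq]
        omega
      have hall : ys.filter (fun w => !decide (key w = k)) = ys := by
        apply List.filter_eq_self.mpr
        intro w hw
        have := hs.1 w hw
        simp only [Bool.not_eq_true', decide_eq_false_iff_not]
        omega
      rw [List.filter_cons, List.filter_cons]
      simp [h, hnone, hall]

theorem sorted_partition {α : Type} (key : α → Int) (L : List α) (K : List Int)
    (hL : L.Pairwise (fun a b => key a ≤ key b)) (hK : K.Pairwise (· < ·))
    (hmem : ∀ j, j ∈ K ↔ j ∈ L.map key) :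
    L = K.flatMap (fun k => L.filter (fun w => decide (key w = k))) := by
  induction K generalizing L with
  | nil =>
    simp only [List.flatMap_nil]
    cases L with
    | nil => rfl
    | cons y ys =>
      exfalso
      have := (hmem (key y)).mpr (by simp)
      simp at this
  | cons k K' ih =>
    rw [List.pairwise_cons] at hK
    have hmin : ∀ w ∈ L, k ≤ key w := by
      intro w hw
      have hkey : key w ∈ k :: K' := (hmem (key w)).mpr (List.mem_map_of_mem hw)
      rcases List.mem_cons.mp hkey with h | h
      · omega
      · exact le_of_lt (hK.1 _ h)
    have hsplit := sorted_min_prefix key k L hL hmin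
    set L' := L.filter (fun w => !decide (key w = k)) with hL'
    have hL'sorted : L'.Pairwise (fun a b => key a ≤ key b) := hL.filter _
    have hmem' : ∀ j, j ∈ K' ↔ j ∈ L'.map key := by
      intro j
      constructor
      · intro hj
        have hjk : k < j := hK.1 _ hj
        have : j ∈ L.map key := (hmem j).mp (List.mem_cons_of_mem _ hj)
        rcases List.mem_map.mp this with ⟨w, hw, hwj⟩
        apply List.mem_map.mpr
        exact ⟨w, List.mem_filter.mpr ⟨hw, by simp; omega⟩, hwj⟩
      · intro hj
        rcases List.mem_map.mp hj with ⟨w, hw, hwj⟩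
        rcases List.mem_filter.mp hw with ⟨hwL, hwne⟩
        have : j ∈ k :: K' := (hmem j).mpr (by subst hwj; exact List.mem_map_of_mem hwL)
        rcases List.mem_cons.mp this with h | h
        · exfalso; subst h hwj; simp at hwne
        · exact h
    have hrec := ih L' hL'sorted hK.2 hmem'
    have hfilter : ∀ j ∈ K', L'.filter (fun w => decide (key w = j)) =
        L.filter (fun w => decide (key w = j)) := by
      intro j hj
      have hjk : k < j := hK.1 _ hj
      rw [hL', List.filter_filter]
      apply List.filter_congr
      intro w hw
      simp only [Bool.and_eq_left_iff_imp, Bool.not_eq_true', decide_eq_false_iff_not,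
        decide_eq_true_eq]
      intro h; omega
    rw [List.flatMap_cons]
    conv_lhs => rw [hsplit]
    congr 1
    rw [hrec]
    exact List.flatMap_congr hfilter

-- characterization of A's first loop (the length-keyed dict)
theorem step1_eq_insert (d : PySem.Dict Int (List Char)) (i : List Char) :
    arrangeA_step1 d i =
      d.insert (i.length : Int)
        (if d.contains (i.length : Int) then d.getD (i.length : Int) [] ++ ' ' :: i else i) := by
  unfold arrangeA_step1
  split_ifs with h1 <;> simp_all

theorem fold_step1_get? (l : List (List Char)) (d : PySem.Dict Int (List Char)) (k : Int) :
    (l.foldl arrangeA_step1 d).get? k =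
      match d.get? k with
      | some v => some ((l.filter (fun w => decide ((w.length : Int) = k))).foldl
          (fun a w => a ++ ' ' :: w) v)
      | none =>
        match l.filter (fun w => decide ((w.length : Int) = k)) with
        | [] => none
        | w :: g => some (g.foldl (fun a w => a ++ ' ' :: w) w) := by
  induction l generalizing d with
  | nil => cases hd : d.get? k <;> simp [hd]
  | cons i l ih =>
    rw [List.foldl_cons, ih, List.filter_cons]
    by_cases hk : (i.length : Int) = k
    · simp only [hk, decide_true, if_true]
      cases hd : d.get? k with
      | none =>
        have hc : d.contains k = false := by
          rw [PySem.Dict.contains_eq_isSome_get?, hd]; rfl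
        have : (arrangeA_step1 d i).get? k = some i := by
          unfold arrangeA_step1
          rw [hk]
          simp [hc, PySem.Dict.get?_insert_self]
        rw [this]
      | some v =>
        have hc : d.contains k = true := by
          rw [PySem.Dict.contains_eq_isSome_get?, hd]; rfl
        have : (arrangeA_step1 d i).get? k = some (v ++ ' ' :: i) := by
          unfold arrangeA_step1
          rw [hk]
          simp [hc, PySem.Dict.get?_insert_self, PySem.Dict.getD_eq_get?_getD, hd]
        rw [this]
        simp
    · have : (arrangeA_step1 d i).get? k = d.get? k := by
        unfold arrangeA_step1
        split_ifs <;> rw [PySem.Dict.get?_insert_of_ne _ _ (fun e => hk e.symm)]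
      rw [this]
      simp [hk]

-- " ".join bookkeeping
theorem pyGet?_cons_zero {α : Type} (c : α) (t : List α) :
    PySem.List.pyGet? (c :: t) 0 = some c := by
  simp [PySem.List.pyGet?, PySem.List.pyIdx?]

theorem join_append_head (v u : List Char) (g : List (List Char)) :
    PySem.Chars.join [' '] ((v ++ u) :: g) = v ++ PySem.Chars.join [' '] (u :: g) := by
  cases g with
  | nil => rw [PySem.Chars.join_singleton, PySem.Chars.join_singleton]
  | cons q r => rw [PySem.Chars.join_cons_cons, PySem.Chars.join_cons_cons]; simp

theorem foldl_join_eq_join (v : List Char) (g : List (List Char)) :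
    g.foldl (fun a w => a ++ ' ' :: w) v = PySem.Chars.join [' '] (v :: g) := by
  induction g generalizing v with
  | nil => rw [List.foldl_nil, PySem.Chars.join_singleton]
  | cons w rest ih =>
    rw [List.foldl_cons, ih, show v ++ ' ' :: w = (v ++ [' ']) ++ w by simp,
      join_append_head, PySem.Chars.join_cons_cons]

theorem join_cons_ne_nil (w : List Char) (g : List (List Char)) (h : w ≠ [] ∨ g ≠ []) :
    PySem.Chars.join [' '] (w :: g) ≠ [] := by
  cases g with
  | nil =>
    rw [PySem.Chars.join_singleton]
    rcases h with h | h
    · exact h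
    · exact absurd rfl h
  | cons q r =>
    rw [PySem.Chars.join_cons_cons]
    cases w <;> simp

-- A's second loop from count ≥ 1: each item appends " " + lowered chunk
theorem afold (ps : List (Int × List Char)) (res : List Char) (c : Int) (hc : 1 ≤ c)
    (hne : ∀ p ∈ ps, p.2 ≠ []) :
    (ps.foldl arrangeA_step2 (res, c)).1 =
      PySem.Chars.join [' '] (res :: ps.map (fun p => recaseLower p.2)) := by
  induction ps generalizing res c with
  | nil => rw [List.foldl_nil, List.map_nil, PySem.Chars.join_singleton]
  | cons p ps ih =>
    obtain ⟨k, v⟩ := p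
    obtain ⟨a, v', rfl⟩ : ∃ a v', v = a :: v' := by
      cases hv : v with
      | nil => exact absurd hv (hne (k, v) (List.mem_cons_self))
      | cons x y => exact ⟨x, y, rfl⟩
    have hstep : arrangeA_step2 (res, c) (k, a :: v') =
        (res ++ ' ' :: recaseLower (a :: v'), c + 1) := by
      unfold arrangeA_step2 recaseLower
      rw [pyGet?_cons_zero]
      simp [hc]
    rw [List.foldl_cons, hstep,
      ih _ _ (by omega) (fun q hq => hne q (List.mem_cons_of_mem _ hq)),
      List.map_cons,
      show res ++ ' ' :: recaseLower (a :: v') = (res ++ [' ']) ++ recaseLower (a :: v') by simp,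
      join_append_head, PySem.Chars.join_cons_cons]

-- B's loop across the tail of one key class: every word is merged into the last chunk
theorem bfold_same (g : List (List Char)) (k : Int) (hlen : ∀ v ∈ g, ((v.length : Int)) = k)
    (cs : List (List Char)) (c : List Char) :
    g.foldl chunkStep (cs ++ [c], some k) =
      (cs ++ [g.foldl (fun a w => a ++ ' ' :: w) c], some k) := by
  induction g generalizing c with
  | nil => simp
  | cons w g ih =>
    have hw := hlen w (List.mem_cons_self)
    have hstep : chunkStep (cs ++ [c], some k) w = (cs ++ [c ++ ' ' :: w], some k) := by
      unfold chunkStep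
      simp [hw]
    rw [List.foldl_cons, hstep, ih (fun v hv => hlen v (List.mem_cons_of_mem _ hv)),
      List.foldl_cons]

-- B's loop across one whole key class: it appends exactly the joined class as a new chunk
theorem bfold_group (w : List Char) (g : List (List Char)) (k : Int) (cs : List (List Char))
    (p : Option Int) (hwk : ((w.length : Int)) = k)
    (hlen : ∀ v ∈ g, ((v.length : Int)) = k) (hp : p ≠ some k) :
    (w :: g).foldl chunkStep (cs, p) =
      (cs ++ [PySem.Chars.join [' '] (w :: g)], some k) := by
  have hcond : ¬ (some ((w.length : Int)) = p) := by
    rw [hwk]; exact fun e => hp e.symm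
  have hstep : chunkStep (cs, p) w = (cs ++ [w], some k) := by
    unfold chunkStep
    rw [hwk, if_neg (fun e => hp e.symm)]
  rw [List.foldl_cons, hstep, bfold_same g k hlen cs w, foldl_join_eq_join]

-- B's loop across all classes along a strictly increasing key list
theorem bfold_all (gs : List (Int × List (List Char)))
    (hprops : ∀ q ∈ gs, q.2 ≠ [] ∧ ∀ v ∈ q.2, ((v.length : Int)) = q.1) :
    ∀ (cs : List (List Char)) (p : Option Int),
      (gs.map (·.1)).Pairwise (· < ·) → (∀ k ∈ gs.map (·.1), p ≠ some k) →
      (((gs.map (·.2)).flatten).foldl chunkStep (cs, p)).1 =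
        cs ++ gs.map (fun q => PySem.Chars.join [' '] q.2) := by
  induction gs with
  | nil => intro cs p _ _; simp
  | cons q gs ih =>
    intro cs p hpw hp
    obtain ⟨k, g⟩ := q
    obtain ⟨hg, hlens⟩ := hprops (k, g) (List.mem_cons_self)
    obtain ⟨w, g', rfl⟩ : ∃ w g', g = w :: g' := by
      cases hgc : g with
      | nil => exact absurd hgc hg
      | cons x y => exact ⟨x, y, rfl⟩
    simp only [List.map_cons, List.flatten_cons] at *
    rw [List.foldl_append,
      bfold_group w g' k cs p (hlens w (List.mem_cons_self))
        (fun v hv => hlens v (List.mem_cons_of_mem _ hv))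
        (hp k (List.mem_cons_self)),
      ih (fun r hr => hprops r (List.mem_cons_of_mem _ hr)) _ (some k)
        (List.pairwise_cons.mp hpw).2
        (fun j hj e => absurd ((Option.some_inj.mp e) ▸ (List.pairwise_cons.mp hpw).1 j hj)
          (lt_irrefl _)),
      List.append_assoc]
    rfl

-- ===== VERDICT (by name: the statement is the Claim_ definition above) =====
theorem arrangeWords_spec : Claim_equal_arrangeWords := by
  intro text _ hpre
  simp only [Spec_arrangeWords, arrangeWords, arrangeWords_alt]
  unfold Pre_arrangeWords at hpre
  generalize hws : PySem.Chars.splitOn text.toList [' '] = ws at *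
  clear hws
  -- the dict built by loop 1
  have hfold : ws.foldl arrangeA_step1 PySem.Dict.empty =
      ws.foldl (fun d i => d.insert ((i.length : Int))
        (if d.contains (i.length : Int) then d.getD (i.length : Int) [] ++ ' ' :: i else i))
        PySem.Dict.empty := by
    congr 1
    funext d i
    exact step1_eq_insert d i
  have hkeys : (ws.foldl arrangeA_step1 PySem.Dict.empty).keys =
      PySem.Set.ofList (ws.map (fun w => (w.length : Int))) := by
    rw [hfold, PySem.Dict.keys_foldl_insert_key]
    rfl
  have hnodup : (ws.foldl arrangeA_step1 PySem.Dict.empty).keys.Nodup := by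
    rw [hfold]
    exact PySem.Dict.nodup_keys_foldl_insert_key _ _ _ _ (by simp [PySem.Dict.keys_empty])
  have hKlt := PySem.List.sorted_ofList_pairwise_lt (ws.map (fun w => (w.length : Int)))
  have hKperm := PySem.List.sorted_perm (PySem.Set.ofList (ws.map (fun w => (w.length : Int))))
    (fun x => x) false
  set K := PySem.List.sorted (PySem.Set.ofList (ws.map (fun w => (w.length : Int))))
    (fun x => x) with hKdef
  set d := ws.foldl arrangeA_step1 PySem.Dict.empty with hddef
  -- every key class is nonempty and the dict maps its key to its joined words
  have hgrp : ∀ k ∈ K, ∃ w g, ws.filter (fun w => decide ((w.length : Int) = k)) = w :: g ∧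
      d.getD k [] = PySem.Chars.join [' '] (w :: g) := by
    intro k hk
    have hkmem : k ∈ ws.map (fun w => (w.length : Int)) :=
      (PySem.Set.mem_ofList _ _).mp ((PySem.List.mem_sorted _ _ _ _).mp hk)
    rcases List.mem_map.mp hkmem with ⟨w, hwmem, hwk⟩
    have hfne : ws.filter (fun w => decide ((w.length : Int) = k)) ≠ [] := by
      intro he
      have : w ∈ ws.filter (fun w => decide ((w.length : Int) = k)) :=
        List.mem_filter.mpr ⟨hwmem, by simp [hwk]⟩
      rw [he] at this
      simp at this
    obtain ⟨w0, g0, hwg⟩ : ∃ w0 g0,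
        ws.filter (fun w => decide ((w.length : Int) = k)) = w0 :: g0 := by
      cases hfe : ws.filter (fun w => decide ((w.length : Int) = k)) with
      | nil => exact absurd hfe hfne
      | cons a b => exact ⟨a, b, rfl⟩
    refine ⟨w0, g0, hwg, ?_⟩
    have hget := fold_step1_get? ws PySem.Dict.empty k
    rw [PySem.Dict.get?_empty] at hget
    simp only [hwg] at hget
    rw [PySem.Dict.getD_eq_get?_getD, hddef, hget, foldl_join_eq_join]
    rfl
  -- the joined group of every key is a nonempty string (Pre_ is what rules out the single
  -- empty word, whose group would be "")
  have hchunk : ∀ k ∈ K, d.getD k [] ≠ [] := by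
    intro k hk
    obtain ⟨w, g, hwg, hgetd⟩ := hgrp k hk
    rw [hgetd]
    apply join_cons_ne_nil
    by_contra hcon
    simp only [not_or, ne_eq, not_not] at hcon
    obtain ⟨rfl, rfl⟩ := hcon
    -- the class of key k is the single empty word: k = 0 and ws.count [] = 1
    have hk0 : k = 0 := by
      have := List.mem_filter.mp (hwg ▸ (List.mem_cons_self :
        ([] : List Char) ∈ [] :: ([] : List (List Char))))
      have h2 : (0 : Int) = k := by simpa using this.2
      omega
    subst hk0
    have hfeq : ws.filter (fun w => decide ((w.length : Int) = 0)) =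
        ws.filter (fun w => w == []) := by
      apply List.filter_congr
      intro w _
      cases w with
      | nil => simp
      | cons c cs => simp; omega
    have : ws.count ([] : List Char) = 1 := by
      rw [List.count_eq_length_filter]
      rw [← hfeq, hwg]
      rfl
    exact hpre this
  -- sorted(dict1.items()) runs along K
  have hsortitems : PySem.List.sorted d.items (fun p => p.1) =
      K.map (fun k => (k, d.getD k [])) := by
    apply PySem.List.sorted_eq_of_perm_of_pairwise_lt
    · rw [PySem.Dict.items_eq_map_keys d hnodup [], hkeys]
      exact hKperm.map _
    · exact List.Pairwise.map _ (fun a b h => h) hKlt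
  -- the stable sort splits into the key classes along K
  have hSpart : PySem.List.sorted ws (fun w => (w.length : Int)) =
      K.flatMap (fun k => ws.filter (fun w => decide ((w.length : Int) = k))) := by
    have hmem : ∀ j, j ∈ K ↔
        j ∈ (PySem.List.sorted ws (fun w => (w.length : Int))).map
          (fun w => (w.length : Int)) := by
      intro j
      rw [PySem.List.mem_sorted, PySem.Set.mem_ofList]
      exact Iff.symm (((PySem.List.sorted_perm ws (fun w => (w.length : Int)) false).map
        (fun w => (w.length : Int))).mem_iff)
    have hpart := sorted_partition (fun w => (w.length : Int))
      (PySem.List.sorted ws (fun w => (w.length : Int))) K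
      (PySem.List.sorted_pairwise ws (fun w => (w.length : Int))) hKlt hmem
    rw [hpart]
    exact List.flatMap_congr (fun k _ => sorted_filter_key (fun w => (w.length : Int)) k ws)
  -- B's chunk list is the list of joined groups along K
  set gs := K.map (fun k => (k, ws.filter (fun w => decide ((w.length : Int) = k)))) with hgs
  have hprops : ∀ q ∈ gs, q.2 ≠ [] ∧ ∀ v ∈ q.2, ((v.length : Int)) = q.1 := by
    intro q hq
    rcases List.mem_map.mp hq with ⟨k, hk, rfl⟩
    obtain ⟨w, g, hwg, _⟩ := hgrp k hk
    refine ⟨by rw [hwg]; simp, ?_⟩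
    intro v hv
    simpa using (List.mem_filter.mp hv).2
  have hfst : gs.map (·.1) = K := by
    rw [hgs, List.map_map]
    exact List.map_id'' (fun _ => rfl) K
  have hflat : (gs.map (·.2)).flatten =
      K.flatMap (fun k => ws.filter (fun w => decide ((w.length : Int) = k))) := by
    rw [hgs, List.map_map, List.flatMap_def]
    rfl
  have hchunks : ((PySem.List.sorted ws (fun w => (w.length : Int))).foldl
      chunkStep ([], none)).1 =
      K.map (fun k => PySem.Chars.join [' ']
        (ws.filter (fun w => decide ((w.length : Int) = k)))) := by
    rw [hSpart, ← hflat,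
      bfold_all gs hprops [] none (by rw [hfst]; exact hKlt) (fun k _ e => by cases e)]
    rw [hgs, List.map_map]
    rfl
  -- the chunk of key k equals the dict's joined value at k
  have hsame : ∀ k ∈ K, PySem.Chars.join [' ']
      (ws.filter (fun w => decide ((w.length : Int) = k))) = d.getD k [] := by
    intro k hk
    obtain ⟨w, g, hwg, hgetd⟩ := hgrp k hk
    rw [hwg, hgetd]
  rw [hchunks, hsortitems]
  cases hKcase : K with
  | nil => rfl
  | cons k0 K' =>
    have hk0K : k0 ∈ K := by rw [hKcase]; exact List.mem_cons_self
    have hc0 : PySem.Chars.join [' ']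
        (ws.filter (fun w => decide ((w.length : Int) = k0))) = d.getD k0 [] :=
      hsame k0 hk0K
    obtain ⟨a, t, hat⟩ : ∃ a t, d.getD k0 [] = a :: t := by
      cases hv : d.getD k0 [] with
      | nil => exact absurd hv (hchunk k0 hk0K)
      | cons x y => exact ⟨x, y, rfl⟩
    -- A's first iteration (count = 0): upper-cases the head of the first chunk
    have hstep0 : arrangeA_step2 ([], 0) (k0, d.getD k0 []) = (recaseUpper (d.getD k0 []), 1) := by
      unfold arrangeA_step2 recaseUpper
      rw [hat, pyGet?_cons_zero]
      norm_num
    rw [List.map_cons, List.map_cons, List.foldl_cons, hstep0,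
      afold _ _ _ (by omega) (by
        intro p hp
        rcases List.mem_map.mp hp with ⟨k, hk, rfl⟩
        exact hchunk k (by rw [hKcase]; exact List.mem_cons_of_mem _ hk)),
      List.map_map, hc0]
    dsimp only
    rw [List.map_map]
    congr 3
    apply List.map_congr_left
    intro k hk
    simp only [Function.comp]
    rw [hsame k (by rw [hKcase]; exact List.mem_cons_of_mem _ hk)]
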